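-- pv_equiv track=rewrite | github.com/mckk12/Advent-Of-Code-2025 | Day-8/playground1.py | connect_closest_boxes
-- ===== SOURCE A (Python) =====
-- def calc_dist(box1, box2):
--     return (box1[0] - box2[0]) ** 2 + (box1[1] - box2[1]) ** 2 + (box1[2] - box2[2]) ** 2
--
-- def connect_closest_boxes(boxes_cords, pairs_amount):
--     connections = []
--     for i in range(len(boxes_cords)):
--         for j in range(i + 1, len(boxes_cords)):
--             dist = calc_dist(boxes_cords[i], boxes_cords[j])
--             pair = (dist, i, j)
--             connections.append(pair)
--     connections.sort(key=lambda x: x[0])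
--
--     circuits = []
--     for conn in connections[:pairs_amount]:
--         dist, box1_idx, box2_idx = conn
--         box1_in_circuit = any(box1_idx in circuit for circuit in circuits)
--         box2_in_circuit = any(box2_idx in circuit for circuit in circuits)
--         if not box1_in_circuit and not box2_in_circuit:
--             circuits.append({box1_idx, box2_idx})
--         elif box1_in_circuit and not box2_in_circuit:
--             for circuit in circuits:
--                 if box1_idx in circuit:
--                     circuit.add(box2_idx)
--                     break
--         elif not box1_in_circuit and box2_in_circuit:
--             for circuit in circuits:
--                 if box2_idx in circuit:
--                     circuit.add(box1_idx)
--                     break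
--         else:
--             circuit1 = circuit2 = None
--             for circuit in circuits:
--                 if box1_idx in circuit:
--                     circuit1 = circuit
--                 if box2_idx in circuit:
--                     circuit2 = circuit
--                 if circuit1 is not None and circuit2 is not None:
--                     break
--             if circuit1 is circuit2:
--                 continue
--             circuit1.update(circuit2)
--             circuits.remove(circuit2)
--     return circuits
-- ===== SOURCE B (Python) =====
-- def calc_dist(box1, box2):
--     return (box1[0] - box2[0]) ** 2 + (box1[1] - box2[1]) ** 2 + (box1[2] - box2[2]) ** 2
--
-- def connect_closest_boxes(boxes_cords, pairs_amount):
--     n = len(boxes_cords)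
--     edges = [(calc_dist(boxes_cords[i], boxes_cords[j]), i, j)
--              for i in range(n) for j in range(i + 1, n)]
--
--     # Union-Find: lazy parent forest instead of scanning a list of circuit sets.
--     parent = {}   # box -> parent box (roots point to themselves)
--     stamp = {}    # root -> creation time of its circuit
--     members = {}  # live root -> set of boxes of its circuit
--     t = 0
--
--     def find(x):
--         while parent[x] != x:
--             x = parent[x]
--         return x
--
--     for _, a, b in sorted(edges, key=lambda e: e[0])[:pairs_amount]:
--         if a not in parent and b not in parent:
--             parent[a] = parent[b] = a
--             stamp[a] = t
--             members[a] = {a, b}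
--             t += 1
--             continue
--         if a not in parent:
--             a, b = b, a          # make a the endpoint already in a circuit
--         ra = find(a)
--         if b not in parent:
--             parent[b] = ra
--             members[ra].add(b)
--         else:
--             rb = find(b)
--             if rb != ra:
--                 parent[rb] = ra
--                 members[ra] |= members[rb]
--                 del members[rb]
--
--     # circuit order = creation order of the surviving root's stamp
--     return [members[r] for r in sorted(members, key=lambda r: stamp[r])]
-- ===== Notes on version B (the rewrite author's own statement) =====
-- stated objective: alternative
-- what changed: Circuit building uses a Union-Find parent forest (lazy find() by pointer chasing, one pointer write per merge, creation-stamp dict) and the circuit list order is recovered at the end by sorting live roots by creation stamp, instead of A's repeated linear membership scans over an ordered list of circuit sets; pair generation and distance sorting are unchanged.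
import Mathlib
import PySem

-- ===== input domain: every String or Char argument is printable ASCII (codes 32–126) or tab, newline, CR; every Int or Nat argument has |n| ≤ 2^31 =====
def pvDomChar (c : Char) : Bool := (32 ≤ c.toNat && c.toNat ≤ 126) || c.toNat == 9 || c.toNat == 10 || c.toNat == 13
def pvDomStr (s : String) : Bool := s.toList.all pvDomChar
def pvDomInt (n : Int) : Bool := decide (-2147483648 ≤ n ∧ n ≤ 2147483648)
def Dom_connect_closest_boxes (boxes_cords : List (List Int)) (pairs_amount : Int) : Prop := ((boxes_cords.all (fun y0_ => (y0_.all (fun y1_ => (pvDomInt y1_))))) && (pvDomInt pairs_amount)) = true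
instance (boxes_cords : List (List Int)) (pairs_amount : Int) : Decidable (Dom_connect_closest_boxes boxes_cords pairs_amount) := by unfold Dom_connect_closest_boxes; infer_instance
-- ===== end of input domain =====

-- B replaces A's scans over the list of circuit sets by a Union-Find parent forest
-- (lazy find; circuit order recovered at the end by sorting creation stamps).
-- Objective: alternative algorithm (near-linear merging instead of per-merge scans).

-- ===== PORT A =====

-- calc_dist(box1, box2); box indexing is total via pyGetD — Pre_ guarantees length ≥ 3
-- exactly where Python evaluates it (Python raises IndexError outside Pre_).
def pvCalcDist (box1 box2 : List Int) : Int :=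
  (PySem.List.pyGetD box1 0 0 - PySem.List.pyGetD box2 0 0) ^ 2 +
  (PySem.List.pyGetD box1 1 0 - PySem.List.pyGetD box2 1 0) ^ 2 +
  (PySem.List.pyGetD box1 2 0 - PySem.List.pyGetD box2 2 0) ^ 2

-- the nested for-loops building `connections` by append
def pvConnectionsA (boxes_cords : List (List Int)) : List (Int × Int × Int) :=
  let n : Int := boxes_cords.length
  (PySem.List.pyRange 0 n 1).foldl (fun acc i =>
    (PySem.List.pyRange (i + 1) n 1).foldl (fun acc j =>
      acc ++ [(pvCalcDist (PySem.List.pyGetD boxes_cords i []) (PySem.List.pyGetD boxes_cords j []), i, j)]) acc) []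

-- 'for circuit in circuits: if box1_idx in circuit: circuit.add(box2_idx); break'
def pvAddToFirst : List (PySem.Set Int) → Int → Int → List (PySem.Set Int)
  | [], _, _ => []
  | c :: rest, a, b =>
    if PySem.Set.contains c a then PySem.Set.add c b :: rest
    else c :: pvAddToFirst rest a b

-- the else-branch search loop: circuit1/circuit2 as list positions (positions model
-- Python object identity: the circuits list always holds distinct set objects)
def pvFindBoth : List (PySem.Set Int) → Int → Int → Option Nat → Option Nat → Nat → Option Nat × Option Nat
  | [], _, _, c1, c2, _ => (c1, c2)
  | c :: rest, a, b, c1, c2, k =>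
    let c1' := if PySem.Set.contains c a then some k else c1
    let c2' := if PySem.Set.contains c b then some k else c2
    if c1'.isSome && c2'.isSome then (c1', c2')
    else pvFindBoth rest a b c1' c2' (k + 1)

def pvStepA (circuits : List (PySem.Set Int)) (conn : Int × Int × Int) : List (PySem.Set Int) :=
  let a := conn.2.1
  let b := conn.2.2
  let in1 := circuits.any (fun c => PySem.Set.contains c a)
  let in2 := circuits.any (fun c => PySem.Set.contains c b)
  if !in1 && !in2 then
    circuits ++ [PySem.Set.add (PySem.Set.add PySem.Set.empty a) b]
  else if in1 && !in2 then
    pvAddToFirst circuits a b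
  else if !in1 && in2 then
    pvAddToFirst circuits b a
  else
    match pvFindBoth circuits a b none none 0 with
    | (some i1, some i2) =>
      if i1 = i2 then circuits
      else
        -- circuit1.update(circuit2); circuits.remove(circuit2): A's circuits are
        -- pairwise disjoint nonempty sets, so list.remove (first ==) removes exactly
        -- the object at position i2
        (circuits.set i1 (PySem.Set.union (circuits.getD i1 []) (circuits.getD i2 []))).eraseIdx i2
    | _ => circuits  -- unreachable: in this branch both boxes occur in some circuit

def connect_closest_boxes (boxes_cords : List (List Int)) (pairs_amount : Int) : List (List Int) :=
  let connections := pvConnectionsA boxes_cords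
  let sortedConns := PySem.List.sorted connections (fun x => x.1) false
  (PySem.List.slice sortedConns none (some pairs_amount)).foldl pvStepA []

-- ===== PORT B =====

-- Union-Find state: parent forest, root -> creation stamp, live root -> member set
structure PvDsu where
  parent : PySem.Dict Int Int
  stamp : PySem.Dict Int Int
  members : PySem.Dict Int (PySem.Set Int)
  t : Int

-- 'while parent[x] != x: x = parent[x]': fuel = number of dict entries bounds the
-- (acyclic, proved below) parent chain; find is only called on keys of parent
def pvFind (parent : PySem.Dict Int Int) : Nat → Int → Int
  | 0, x => x
  | fuel + 1, x =>
    let p := parent.getD x x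
    if p = x then x else pvFind parent fuel p

def pvStepB (st : PvDsu) (conn : Int × Int × Int) : PvDsu :=
  let a := conn.2.1
  let b := conn.2.2
  if !st.parent.contains a && !st.parent.contains b then
    { parent := (st.parent.insert a a).insert b a,
      stamp := st.stamp.insert a st.t,
      members := st.members.insert a (PySem.Set.add (PySem.Set.add PySem.Set.empty a) b),
      t := st.t + 1 }
  else
    -- 'if a not in parent: a, b = b, a'
    let ab := if !st.parent.contains a then (b, a) else (a, b)
    let a := ab.1
    let b := ab.2
    let ra := pvFind st.parent st.parent.size a
    if !st.parent.contains b then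
      -- members[ra].add(b): ra is a live root, so modify's default is unreachable
      { st with parent := st.parent.insert b ra,
                members := st.members.modify ra [] (fun s => PySem.Set.add s b) }
    else
      let rb := pvFind st.parent st.parent.size b
      if rb ≠ ra then
        { st with parent := st.parent.insert rb ra,
                  members := (st.members.modify ra []
                    (fun s => PySem.Set.union s (st.members.getD rb []))).erase rb }
      else st

def connect_closest_boxes_alt (boxes_cords : List (List Int)) (pairs_amount : Int) : List (List Int) :=
  let n : Int := boxes_cords.length
  let edges := (PySem.List.pyRange 0 n 1).flatMap (fun i =>
    (PySem.List.pyRange (i + 1) n 1).map (fun j =>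
      (pvCalcDist (PySem.List.pyGetD boxes_cords i []) (PySem.List.pyGetD boxes_cords j []), i, j)))
  let chosen := PySem.List.slice (PySem.List.sorted edges (fun e => e.1) false) none (some pairs_amount)
  let st := chosen.foldl pvStepB ⟨PySem.Dict.empty, PySem.Dict.empty, PySem.Dict.empty, 0⟩
  (PySem.List.sorted st.members.keys (fun r => st.stamp.getD r 0) false).map
    (fun r => st.members.getD r [])

-- ===== PRECONDITION & SPEC =====

-- Pre_ excludes exactly the inputs where Python A raises IndexError: as soon as there
-- are two boxes every box is indexed at [0],[1],[2] by calc_dist.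
def Pre_connect_closest_boxes (boxes_cords : List (List Int)) (pairs_amount : Int) : Prop :=
  2 ≤ boxes_cords.length → ∀ b ∈ boxes_cords, 3 ≤ b.length
instance (boxes_cords : List (List Int)) (pairs_amount : Int) : Decidable (Pre_connect_closest_boxes boxes_cords pairs_amount) := by unfold Pre_connect_closest_boxes; infer_instance

def pvWitness_connect_closest_boxes : List (List Int) × Int := ([[0, 0, 0], [1, 0, 0], [5, 5, 5]], 2)

def Spec_connect_closest_boxes (boxes_cords : List (List Int)) (pairs_amount : Int) (out : List (List Int)) : Prop := out = connect_closest_boxes_alt boxes_cords pairs_amount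
instance (boxes_cords : List (List Int)) (pairs_amount : Int) (out : List (List Int)) : Decidable (Spec_connect_closest_boxes boxes_cords pairs_amount out) := by unfold Spec_connect_closest_boxes; infer_instance

-- ===== CLAIM (what is proved, stated in full; the proofs are below) =====
def Claim_equal_connect_closest_boxes : Prop := ∀ (boxes_cords : List (List Int)) (pairs_amount : Int), Dom_connect_closest_boxes boxes_cords pairs_amount → Pre_connect_closest_boxes boxes_cords pairs_amount → Spec_connect_closest_boxes boxes_cords pairs_amount (connect_closest_boxes boxes_cords pairs_amount)

-- ===== LEMMAS AND PROOFS =====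


-- ---------- parent-forest chains (proof-only machinery) ----------

-- a parent chain from x to root r of length k, all nodes inside the member set s
inductive pvChain (parent : PySem.Dict Int Int) (s : List Int) : Int → Int → Nat → Prop
  | root : ∀ r, r ∈ s → parent.get? r = some r → pvChain parent s r r 0
  | step : ∀ x p r k, x ∈ s → parent.get? x = some p → pvChain parent s p r k →
      pvChain parent s x r (k + 1)

lemma pvChain_sub {parent : PySem.Dict Int Int} {s s' : List Int} {x r : Int} {k : Nat}
    (h : pvChain parent s x r k) (hs : ∀ y ∈ s, y ∈ s') : pvChain parent s' x r k := by
  induction h with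
  | root r hr hg => exact pvChain.root r (hs r hr) hg
  | step x p r k hx hg _ ih => exact pvChain.step x p r k (hs x hx) hg ih

lemma pvChain_insert_not_mem {parent : PySem.Dict Int Int} {s : List Int} {x r y v : Int} {k : Nat}
    (h : pvChain parent s x r k) (hy : y ∉ s) : pvChain (parent.insert y v) s x r k := by
  induction h with
  | root r hr hg =>
    have hne : r ≠ y := fun he => hy (he ▸ hr)
    exact pvChain.root r hr (by rw [PySem.Dict.get?_insert_of_ne _ v hne]; exact hg)
  | step x p r k hx hg _ ih =>
    have hne : x ≠ y := fun he => hy (he ▸ hx)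
    exact pvChain.step x p r k hx
      (by rw [PySem.Dict.get?_insert_of_ne _ v hne]; exact hg) ih

lemma pvChain_root_self {parent : PySem.Dict Int Int} {s : List Int} {x r : Int} {k : Nat}
    (h : pvChain parent s x r k) : r ∈ s ∧ parent.get? r = some r := by
  induction h with
  | root r hr hg => exact ⟨hr, hg⟩
  | step _ _ _ _ _ _ _ ih => exact ih

lemma pvChain_loop {parent : PySem.Dict Int Int} {s : List Int} {x r : Int} {k : Nat}
    (h : pvChain parent s x r k) (hx : parent.get? x = some x) : r = x := by
  induction h with
  | root r _ _ => rfl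
  | step x p r k _ hg _ ih =>
    have hp : p = x := by rw [hx] at hg; exact (Option.some_inj.mp hg).symm
    subst hp
    exact ih hx

lemma pvFind_eq {parent : PySem.Dict Int Int} {s : List Int} {x r : Int} {k : Nat}
    (h : pvChain parent s x r k) : ∀ fuel, k ≤ fuel → pvFind parent fuel x = r := by
  induction h with
  | root r hr hg =>
    intro fuel _
    cases fuel with
    | zero => rfl
    | succ f => simp [pvFind, PySem.Dict.getD_of_get?_eq_some _ _ hg]
  | step x p r k hx hg hch ih =>
    intro fuel hf
    obtain ⟨f, rfl⟩ : ∃ f, fuel = f + 1 := ⟨fuel - 1, by omega⟩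
    simp only [pvFind, PySem.Dict.getD_of_get?_eq_some _ _ hg]
    by_cases hpx : p = x
    · subst hpx
      rw [if_pos rfl]
      exact (pvChain_loop hch hg).symm ▸ rfl
    · rw [if_neg hpx]
      exact ih f (by omega)

lemma pvChain_relink {parent : PySem.Dict Int Int} {s s' : List Int} {x ra rb : Int} {k : Nat}
    (h : pvChain parent s x rb k) (hra : parent.get? ra = some ra)
    (hras : ra ∈ s') (hs : ∀ y ∈ s, y ∈ s') :
    ra ≠ rb → ∃ k' ≤ k + 1, pvChain (parent.insert rb ra) s' x ra k' := by
  induction h with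
  | root r hr hg =>
    intro hne
    refine ⟨1, le_refl _, pvChain.step r ra ra 0 (hs r hr) (PySem.Dict.get?_insert_self _ _ _) ?_⟩
    exact pvChain.root ra hras (by rw [PySem.Dict.get?_insert_of_ne _ _ hne]; exact hra)
  | step x p r k hx hg hch ih =>
    intro hne
    by_cases hxrb : x = r
    · subst hxrb
      refine ⟨1, by omega, pvChain.step x ra ra 0 (hs x hx) (PySem.Dict.get?_insert_self _ _ _) ?_⟩
      exact pvChain.root ra hras (by rw [PySem.Dict.get?_insert_of_ne _ _ hne]; exact hra)
    · obtain ⟨k', hk', hch'⟩ := ih hne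
      exact ⟨k' + 1, by omega, pvChain.step x p ra k' (hs x hx)
        (by rw [PySem.Dict.get?_insert_of_ne _ _ hxrb]; exact hg) hch'⟩

-- ---------- Dict.erase facts (not in the prelude's lemma list) ----------

lemma pvDict_get?_erase_of_ne {κ ν : Type} [BEq κ] [LawfulBEq κ] (d : PySem.Dict κ ν)
    (k k' : κ) (h : k' ≠ k) : (d.erase k).get? k' = d.get? k' := by
  obtain ⟨l⟩ := d
  simp only [PySem.Dict.erase, PySem.Dict.get?]
  induction l with
  | nil => rfl
  | cons p t ih =>
    by_cases hp : p.1 = k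
    · have h1 : (p.1 == k) = true := beq_iff_eq.mpr hp
      have h2 : (p.1 == k') = false := by
        rw [beq_eq_false_iff_ne, hp]
        exact fun hh => h hh.symm
      simp only [List.filter_cons, h1, Bool.not_true, Bool.false_eq_true, if_false,
        List.find?_cons, h2]
      exact ih
    · have h1 : (p.1 == k) = false := beq_eq_false_iff_ne.mpr hp
      by_cases hk' : p.1 = k'
      · have h2 : (p.1 == k') = true := beq_iff_eq.mpr hk'
        simp [h1, h2]
      · have h2 : (p.1 == k') = false := beq_eq_false_iff_ne.mpr hk'
        simp only [List.filter_cons, h1, Bool.not_false, if_true, List.find?_cons, h2]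
        exact ih

lemma pvDict_getD_erase_of_ne {κ ν : Type} [BEq κ] [LawfulBEq κ] (d : PySem.Dict κ ν)
    (k k' : κ) (d0 : ν) (h : k' ≠ k) : (d.erase k).getD k' d0 = d.getD k' d0 := by
  rw [PySem.Dict.getD_eq_get?_getD, PySem.Dict.getD_eq_get?_getD, pvDict_get?_erase_of_ne d k k' h]

lemma pvDict_mem_keys_erase {κ ν : Type} [BEq κ] [LawfulBEq κ] (d : PySem.Dict κ ν)
    (k k' : κ) : k' ∈ (d.erase k).keys ↔ k' ≠ k ∧ k' ∈ d.keys := by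
  obtain ⟨l⟩ := d
  simp only [PySem.Dict.erase, PySem.Dict.keys, List.mem_map, List.mem_filter]
  constructor
  · rintro ⟨p, ⟨hp, hne⟩, rfl⟩
    refine ⟨by simpa using hne, ⟨p, hp, rfl⟩⟩
  · rintro ⟨hne, p, hp, rfl⟩
    exact ⟨p, ⟨hp, by simpa using hne⟩, rfl⟩

lemma pvDict_nodup_keys_erase {κ ν : Type} [BEq κ] (d : PySem.Dict κ ν) (k : κ)
    (h : d.keys.Nodup) : (d.erase k).keys.Nodup := by
  obtain ⟨l⟩ := d
  simp only [PySem.Dict.erase, PySem.Dict.keys] at *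
  exact List.Nodup.sublist (List.Sublist.map Prod.fst List.filter_sublist) h

-- ---------- Set.union of disjoint nodup sets is append ----------

lemma pvSet_union_append (s t : PySem.Set Int) (hd : ∀ x ∈ t, x ∉ s) (ht : List.Nodup t) :
    PySem.Set.union s t = s ++ t := by
  induction t generalizing s with
  | nil => simp [PySem.Set.union, PySem.Set.update]
  | cons x t ih =>
    rw [List.nodup_cons] at ht
    have hx : x ∉ s := hd x (by simp)
    have h1 : PySem.Set.union s (x :: t) = PySem.Set.union (s ++ [x]) t := by
      simp [PySem.Set.union, PySem.Set.update, PySem.Set.add_of_not_mem hx]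
    rw [h1, ih (s ++ [x]) ?_ ht.2]
    · simp
    · intro y hy
      simp only [List.mem_append, List.mem_singleton]
      rintro (h | h)
      · exact hd y (by simp [hy]) h
      · exact ht.1 (h ▸ hy)


-- ---------- the simulation invariant between A's circuits list and B's DSU state ----------

-- the member set B's state assigns to a root
def pvMem (st : PvDsu) (r : Int) : PySem.Set Int := st.members.getD r []

-- L is the list of live roots, in circuit-creation (stamp) order
structure pvInvL (L : List Int) (circuits : List (PySem.Set Int)) (st : PvDsu) : Prop where
  hmap : circuits = L.map (pvMem st)
  hkeys : ∀ r, r ∈ L ↔ r ∈ st.members.keys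
  hstamps : (L.map (fun r => st.stamp.getD r 0)).Pairwise (· < ·)
  hlt : ∀ r ∈ L, st.stamp.getD r 0 < st.t
  hpnd : st.parent.keys.Nodup
  hmnd : st.members.keys.Nodup
  hcover : ∀ x, x ∈ st.parent.keys ↔ ∃ r ∈ L, x ∈ pvMem st r
  hsetnd : ∀ r ∈ L, (pvMem st r).Nodup
  hdisj : ∀ r ∈ L, ∀ r' ∈ L, r ≠ r' → ∀ x, x ∈ pvMem st r → x ∉ pvMem st r'
  hchain : ∀ r ∈ L, ∀ x ∈ pvMem st r, ∃ k, pvChain st.parent (pvMem st r) x r k ∧ k < (pvMem st r).length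
  hself : ∀ r ∈ L, r ∈ pvMem st r

def pvInv (circuits : List (PySem.Set Int)) (st : PvDsu) : Prop := ∃ L, pvInvL L circuits st

lemma pvInvL_nodupL {L : List Int} {circuits : List (PySem.Set Int)} {st : PvDsu}
    (h : pvInvL L circuits st) : L.Nodup := by
  have h1 : (L.map (fun r => st.stamp.getD r 0)).Nodup :=
    h.hstamps.imp (fun hlt => ne_of_lt hlt)
  exact h1.of_map _

lemma pvInvL_unique {L : List Int} {circuits : List (PySem.Set Int)} {st : PvDsu}
    (h : pvInvL L circuits st) {r r' x : Int} (hr : r ∈ L) (hr' : r' ∈ L)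
    (hx : x ∈ pvMem st r) (hx' : x ∈ pvMem st r') : r = r' := by
  by_contra hne
  exact h.hdisj r hr r' hr' hne x hx hx'

lemma pvInvL_root {L : List Int} {circuits : List (PySem.Set Int)} {st : PvDsu}
    (h : pvInvL L circuits st) {r : Int} (hr : r ∈ L) : st.parent.get? r = some r := by
  obtain ⟨k, hch, _⟩ := h.hchain r hr r (h.hself r hr)
  exact (pvChain_root_self hch).2

lemma pvInvL_find {L : List Int} {circuits : List (PySem.Set Int)} {st : PvDsu}
    (h : pvInvL L circuits st) {r x : Int} (hr : r ∈ L) (hx : x ∈ pvMem st r) :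
    pvFind st.parent st.parent.size x = r := by
  obtain ⟨k, hch, hk⟩ := h.hchain r hr x hx
  apply pvFind_eq hch
  have hsub : ∀ y ∈ pvMem st r, y ∈ st.parent.keys := fun y hy => (h.hcover y).mpr ⟨r, hr, hy⟩
  have hle : (pvMem st r).length ≤ st.parent.keys.length :=
    (List.subperm_of_subset (h.hsetnd r hr) hsub).length_le
  have hsz : st.parent.keys.length = st.parent.size := by
    simp [PySem.Dict.keys, PySem.Dict.size]
  omega

lemma pv_any_eq {L : List Int} {circuits : List (PySem.Set Int)} {st : PvDsu}
    (h : pvInvL L circuits st) (a : Int) :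
    (circuits.any (fun c => PySem.Set.contains c a)) = st.parent.contains a := by
  rw [h.hmap]
  cases hq : st.parent.contains a with
  | false =>
    rw [List.any_eq_false]
    rintro c hc
    simp only [List.mem_map] at hc
    obtain ⟨r, hr, rfl⟩ := hc
    intro hcontains
    rw [PySem.Set.contains_iff] at hcontains
    have : st.parent.contains a = true :=
      (PySem.Dict.contains_iff_mem_keys _ _).mpr ((h.hcover a).mpr ⟨r, hr, hcontains⟩)
    rw [hq] at this
    cases this
  | true =>
    rw [List.any_eq_true]
    obtain ⟨r, hr, hmem⟩ := (h.hcover a).mp ((PySem.Dict.contains_iff_mem_keys _ _).mp hq)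
    exact ⟨pvMem st r, List.mem_map_of_mem hr, by rw [PySem.Set.contains_iff]; exact hmem⟩

-- ---------- A-side loop characterisations ----------

lemma pvAddToFirst_map (g g' : Int → PySem.Set Int) (order : List Int) (a b ca : Int)
    (hnd : order.Nodup) (hca : ca ∈ order)
    (hmem : ∀ cid ∈ order, a ∈ g cid ↔ cid = ca)
    (hg' : ∀ cid ∈ order, g' cid = if cid = ca then PySem.Set.add (g ca) b else g cid) :
    pvAddToFirst (order.map g) a b = order.map g' := by
  induction order with
  | nil => rfl
  | cons cid t ih =>
    rw [List.nodup_cons] at hnd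
    simp only [List.map_cons, pvAddToFirst]
    by_cases hcid : cid = ca
    · subst hcid
      have hc : PySem.Set.contains (g cid) a = true := by
        rw [PySem.Set.contains_iff]; exact (hmem cid (by simp)).mpr rfl
      rw [hc]
      simp only [if_true]
      have hhead : PySem.Set.add (g cid) b = g' cid := by
        rw [hg' cid (by simp)]; simp
      rw [hhead]
      congr 1
      apply List.map_congr_left
      intro x hx
      rw [hg' x (by simp [hx])]
      have : x ≠ cid := fun h => hnd.1 (h ▸ hx)
      simp [this]
    · have hc : PySem.Set.contains (g cid) a = false := by
        rw [← Bool.not_eq_true, PySem.Set.contains_iff]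
        intro hmem'
        exact hcid ((hmem cid (by simp)).mp hmem')
      rw [hc]
      simp only [Bool.false_eq_true, if_false]
      have hca' : ca ∈ t := by
        rcases List.mem_cons.mp hca with h | h
        · exact absurd h.symm hcid
        · exact h
      rw [ih hnd.2 hca' (fun c hc => hmem c (by simp [hc]))
        (fun c hc => hg' c (by simp [hc]))]
      congr 1
      rw [hg' cid (by simp)]
      simp [hcid]

lemma pvFindBoth_skip (p rest : List (PySem.Set Int)) (a b : Int) (c1 c2 : Option Nat) (k : Nat)
    (hb : (c1.isSome && c2.isSome) = false) (hp : ∀ e ∈ p, a ∉ e ∧ b ∉ e) :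
    pvFindBoth (p ++ rest) a b c1 c2 k = pvFindBoth rest a b c1 c2 (k + p.length) := by
  induction p generalizing k with
  | nil => simp
  | cons e t ih =>
    obtain ⟨ha, hb'⟩ := hp e (by simp)
    have hca : PySem.Set.contains e a = false := by
      rw [← Bool.not_eq_true, PySem.Set.contains_iff]; exact ha
    have hcb : PySem.Set.contains e b = false := by
      rw [← Bool.not_eq_true, PySem.Set.contains_iff]; exact hb'
    simp only [List.cons_append, pvFindBoth, hca, hcb, Bool.false_eq_true, if_false, hb]
    rw [ih (k + 1) (fun c hc => hp c (List.mem_cons_of_mem e hc))]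
    congr 1
    simp [List.length_cons]
    omega

lemma pvFindBoth_split1 (p r : List (PySem.Set Int)) (c : PySem.Set Int) (a b : Int)
    (hp : ∀ e ∈ p, a ∉ e ∧ b ∉ e) (hac : a ∈ c) (hbc : b ∈ c) :
    pvFindBoth (p ++ c :: r) a b none none 0 = (some p.length, some p.length) := by
  rw [pvFindBoth_skip p (c :: r) a b none none 0 (by simp) hp]
  simp [pvFindBoth, hac, hbc]

lemma pvFindBoth_split2 (p q r : List (PySem.Set Int)) (c d : PySem.Set Int) (a b : Int)
    (hp : ∀ e ∈ p, a ∉ e ∧ b ∉ e) (hq : ∀ e ∈ q, a ∉ e ∧ b ∉ e)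
    (hac : a ∈ c) (hbc : b ∉ c) (had : a ∉ d) (hbd : b ∈ d) :
    pvFindBoth (p ++ c :: (q ++ d :: r)) a b none none 0 =
      (some p.length, some (p.length + 1 + q.length)) := by
  rw [pvFindBoth_skip p (c :: (q ++ d :: r)) a b none none 0 (by simp) hp]
  have h1 : PySem.Set.contains c a = true := by rw [PySem.Set.contains_iff]; exact hac
  have h2 : PySem.Set.contains c b = false := by
    rw [← Bool.not_eq_true, PySem.Set.contains_iff]; exact hbc
  simp only [pvFindBoth, h1, h2, Bool.false_eq_true, if_false, if_true,
    Option.isSome_some, Option.isSome_none, Bool.and_false, Nat.zero_add]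
  rw [pvFindBoth_skip q (d :: r) a b (some p.length) none (p.length + 1) (by simp) hq]
  simp [pvFindBoth, had, hbd]

lemma pvFindBoth_split2' (p q r : List (PySem.Set Int)) (c d : PySem.Set Int) (a b : Int)
    (hp : ∀ e ∈ p, a ∉ e ∧ b ∉ e) (hq : ∀ e ∈ q, a ∉ e ∧ b ∉ e)
    (hbc : b ∈ c) (hac : a ∉ c) (hbd : b ∉ d) (had : a ∈ d) :
    pvFindBoth (p ++ c :: (q ++ d :: r)) a b none none 0 =
      (some (p.length + 1 + q.length), some p.length) := by
  rw [pvFindBoth_skip p (c :: (q ++ d :: r)) a b none none 0 (by simp) hp]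
  have h1 : PySem.Set.contains c a = false := by
    rw [← Bool.not_eq_true, PySem.Set.contains_iff]; exact hac
  have h2 : PySem.Set.contains c b = true := by rw [PySem.Set.contains_iff]; exact hbc
  simp only [pvFindBoth, h1, h2, Bool.false_eq_true, if_false, if_true,
    Option.isSome_some, Option.isSome_none, Bool.false_and, Nat.zero_add]
  rw [pvFindBoth_skip q (d :: r) a b none (some p.length) (p.length + 1) (by simp) hq]
  simp [pvFindBoth, had, hbd]

lemma pv_set_mid {α : Type} (xs : List α) (y : α) (zs : List α) (v : α) :
    ((xs ++ y :: zs).set xs.length v) = xs ++ v :: zs := by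
  induction xs with
  | nil => rfl
  | cons h t ih => simp [ih]

lemma pv_eraseIdx_mid {α : Type} (xs : List α) (y : α) (zs : List α) :
    ((xs ++ y :: zs).eraseIdx xs.length) = xs ++ zs := by
  induction xs with
  | nil => rfl
  | cons h t ih => simp [ih]

lemma pv_getD_mid {α : Type} [Inhabited α] (xs : List α) (y : α) (zs : List α) (d : α) :
    ((xs ++ y :: zs).getD xs.length d) = y := by
  induction xs with
  | nil => rfl
  | cons h t ih => simpa using ih

lemma pv_erase_mid (xs ys : List Int) (v : Int) (hv : v ∉ xs) :
    ((xs ++ v :: ys).erase v) = xs ++ ys := by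
  induction xs with
  | nil => simp
  | cons x t ih =>
    have hxv : ¬(x == v) = true := by
      simp only [beq_iff_eq]
      exact fun h => hv (by simp [h])
    simp only [List.cons_append, List.erase_cons, hxv, if_false]
    rw [ih (fun h => hv (List.mem_cons_of_mem x h))]
    simp

lemma pvConnections_eq (boxes_cords : List (List Int)) :
    pvConnectionsA boxes_cords =
      (PySem.List.pyRange 0 (boxes_cords.length : Int) 1).flatMap (fun i =>
        (PySem.List.pyRange (i + 1) (boxes_cords.length : Int) 1).map (fun j =>
          (pvCalcDist (PySem.List.pyGetD boxes_cords i []) (PySem.List.pyGetD boxes_cords j []), i, j))) := by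
  simp only [pvConnectionsA, PySem.List.foldl_append_singleton_eq_map]
  rw [PySem.List.foldl_append_eq_flatMap]
  simp


-- B attaches a fresh box y to the circuit of a known box x; A runs pvAddToFirst
lemma pvInv_addfresh {L : List Int} {circuits : List (PySem.Set Int)} {st : PvDsu}
    (h : pvInvL L circuits st) {x y : Int}
    (hx : st.parent.contains x = true) (hy : st.parent.contains y = false) :
    pvInvL L (pvAddToFirst circuits x y)
      { parent := st.parent.insert y (pvFind st.parent st.parent.size x),
        stamp := st.stamp,
        members := st.members.modify (pvFind st.parent st.parent.size x) []
          (fun s => PySem.Set.add s y),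
        t := st.t } := by
  obtain ⟨rx, hrxL, hxm⟩ := (h.hcover x).mp ((PySem.Dict.contains_iff_mem_keys _ _).mp hx)
  have hfind : pvFind st.parent st.parent.size x = rx := pvInvL_find h hrxL hxm
  rw [hfind]
  have hyk : y ∉ st.parent.keys := fun hm => by
    rw [(PySem.Dict.contains_iff_mem_keys _ _).mpr hm] at hy; cases hy
  have hysets : ∀ r ∈ L, y ∉ pvMem st r := fun r hr hm => hyk ((h.hcover y).mpr ⟨r, hr, hm⟩)
  have hyrx : rx ≠ y := fun he => hyk (he ▸ (h.hcover rx).mpr ⟨rx, hrxL, h.hself rx hrxL⟩)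
  have hmem' : ∀ r, pvMem (PvDsu.mk (st.parent.insert y rx) st.stamp
      (st.members.modify rx [] (fun s => PySem.Set.add s y)) st.t) r =
      if r = rx then PySem.Set.add (pvMem st rx) y else pvMem st r := by
    intro r
    simp only [pvMem, PySem.Dict.getD_modify]
  have hsadd : PySem.Set.add (pvMem st rx) y = pvMem st rx ++ [y] :=
    PySem.Set.add_of_not_mem (hysets rx hrxL)
  have huniq : ∀ r ∈ L, x ∈ pvMem st r ↔ r = rx :=
    fun r hr => ⟨fun hm => pvInvL_unique h hr hrxL hm hxm, fun he => he ▸ hxm⟩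
  have hkeys' : (st.members.modify rx [] (fun s => PySem.Set.add s y)).keys = st.members.keys := by
    rw [PySem.Dict.keys_modify, PySem.Dict.keys_insert_of_contains _ _
      ((PySem.Dict.contains_iff_mem_keys _ _).mpr ((h.hkeys rx).mp hrxL))]
  refine ⟨?_, ?_, h.hstamps, h.hlt, ?_, ?_, ?_, ?_, ?_, ?_, ?_⟩
  · rw [h.hmap]
    exact pvAddToFirst_map (pvMem st) _ L x y rx (pvInvL_nodupL h) hrxL huniq
      (fun r _ => hmem' r)
  · intro r
    simp only [hkeys']
    exact h.hkeys r
  · exact PySem.Dict.nodup_keys_insert _ _ _ h.hpnd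
  · simp only [hkeys']
    exact h.hmnd
  · intro z
    simp only [PySem.Dict.mem_keys_insert]
    constructor
    · rintro (rfl | hz)
      · exact ⟨rx, hrxL, by rw [hmem', if_pos rfl]; exact (PySem.Set.mem_add _ _ _).mpr (Or.inr rfl)⟩
      · obtain ⟨r, hr, hm⟩ := (h.hcover z).mp hz
        refine ⟨r, hr, ?_⟩
        rw [hmem']
        by_cases hrr : r = rx
        · subst hrr
          rw [if_pos rfl]
          exact (PySem.Set.mem_add _ _ _).mpr (Or.inl hm)
        · rwa [if_neg hrr]
    · rintro ⟨r, hr, hm⟩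
      rw [hmem'] at hm
      by_cases hrr : r = rx
      · subst hrr
        rw [if_pos rfl] at hm
        rcases (PySem.Set.mem_add _ _ _).mp hm with hm | hm
        · exact Or.inr ((h.hcover z).mpr ⟨r, hr, hm⟩)
        · exact Or.inl hm
      · rw [if_neg hrr] at hm
        exact Or.inr ((h.hcover z).mpr ⟨r, hr, hm⟩)
  · intro r hr
    rw [hmem']
    by_cases hrr : r = rx
    · subst hrr
      rw [if_pos rfl]
      exact PySem.Set.nodup_add _ _ (h.hsetnd r hr)
    · rw [if_neg hrr]
      exact h.hsetnd r hr
  · intro r hr r' hr' hne z hz hz'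
    rw [hmem'] at hz hz'
    by_cases hrr : r = rx
    · subst hrr
      rw [if_pos rfl] at hz
      have hr'ne : ¬ r' = r := fun he => hne he.symm
      rw [if_neg hr'ne] at hz'
      rcases (PySem.Set.mem_add _ _ _).mp hz with hm | rfl
      · exact h.hdisj r hr r' hr' hne z hm hz'
      · exact hysets r' hr' hz'
    · rw [if_neg hrr] at hz
      by_cases hrr' : r' = rx
      · subst hrr'
        rw [if_pos rfl] at hz'
        rcases (PySem.Set.mem_add _ _ _).mp hz' with hm | rfl
        · exact h.hdisj r hr r' hr' hne z hz hm
        · exact hysets r hr hz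
      · rw [if_neg hrr'] at hz'
        exact h.hdisj r hr r' hr' hne z hz hz'
  · intro r hr z hz
    rw [hmem'] at hz ⊢
    simp only
    by_cases hrr : r = rx
    · subst hrr
      rw [if_pos rfl] at hz ⊢
      rw [hsadd] at hz ⊢
      rcases List.mem_append.mp hz with hm | hm
      · obtain ⟨k, hch, hk⟩ := h.hchain r hr z hm
        refine ⟨k, pvChain_sub (pvChain_insert_not_mem hch (hysets r hr)) ?_, ?_⟩
        · intro w hw
          exact List.mem_append.mpr (Or.inl hw)
        · simp only [List.length_append, List.length_singleton]
          omega
      · rw [List.mem_singleton] at hm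
        refine ⟨1, pvChain.step z r r 0 (by simp [hm])
            (by rw [hm]; exact PySem.Dict.get?_insert_self _ _ _) ?_, ?_⟩
        · refine pvChain.root r (by simp [h.hself r hr]) ?_
          rw [PySem.Dict.get?_insert_of_ne _ _ hyrx]
          exact pvInvL_root h hr
        · have h1 : 1 ≤ (pvMem st r).length := List.length_pos_iff.mpr
            (fun he => by rw [he] at hxm; cases hxm)
          simp only [List.length_append, List.length_singleton]
          omega
    · rw [if_neg hrr] at hz ⊢
      obtain ⟨k, hch, hk⟩ := h.hchain r hr z hz
      exact ⟨k, pvChain_insert_not_mem hch (hysets r hr), hk⟩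
  · intro r hr
    rw [hmem']
    by_cases hrr : r = rx
    · subst hrr
      rw [if_pos rfl]
      exact (PySem.Set.mem_add _ _ _).mpr (Or.inl (h.hself r hr))
    · rw [if_neg hrr]
      exact h.hself r hr


-- B opens a new circuit {a, b} with a fresh root a; A appends the set to its list
lemma pvInv_newpair {L : List Int} {circuits : List (PySem.Set Int)} {st : PvDsu}
    (h : pvInvL L circuits st) {a b : Int} (hab : a ≠ b)
    (ha : st.parent.contains a = false) (hb : st.parent.contains b = false) :
    pvInvL (L ++ [a]) (circuits ++ [PySem.Set.add (PySem.Set.add PySem.Set.empty a) b])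
      (PvDsu.mk ((st.parent.insert a a).insert b a) (st.stamp.insert a st.t)
        (st.members.insert a (PySem.Set.add (PySem.Set.add PySem.Set.empty a) b))
        (st.t + 1)) := by
  have hak : a ∉ st.parent.keys := fun hm => by
    rw [(PySem.Dict.contains_iff_mem_keys _ _).mpr hm] at ha; cases ha
  have hbk : b ∉ st.parent.keys := fun hm => by
    rw [(PySem.Dict.contains_iff_mem_keys _ _).mpr hm] at hb; cases hb
  have hasets : ∀ r ∈ L, a ∉ pvMem st r := fun r hr hm => hak ((h.hcover a).mpr ⟨r, hr, hm⟩)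
  have hbsets : ∀ r ∈ L, b ∉ pvMem st r := fun r hr hm => hbk ((h.hcover b).mpr ⟨r, hr, hm⟩)
  have hLk : ∀ r ∈ L, r ∈ st.parent.keys :=
    fun r hr => (h.hcover r).mpr ⟨r, hr, h.hself r hr⟩
  have haL : a ∉ L := fun hm => hak (hLk a hm)
  have hneA : ∀ r ∈ L, ¬ r = a := fun r hr (he : r = a) => haL (he ▸ hr)
  have hnew : PySem.Set.add (PySem.Set.add PySem.Set.empty a) b = [a, b] := by
    have h1 : PySem.Set.add PySem.Set.empty a = [a] :=
      PySem.Set.add_of_not_mem (by simp [PySem.Set.empty])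
    rw [h1, PySem.Set.add_of_not_mem
      (by simp only [List.mem_singleton]; exact fun h => hab h.symm)]
    rfl
  have hmem' : ∀ r, pvMem (PvDsu.mk ((st.parent.insert a a).insert b a) (st.stamp.insert a st.t)
      (st.members.insert a (PySem.Set.add (PySem.Set.add PySem.Set.empty a) b)) (st.t + 1)) r =
      if r = a then [a, b] else pvMem st r := by
    intro r
    simp only [pvMem, PySem.Dict.getD_insert, hnew]
  have hstamp' : ∀ r, (st.stamp.insert a st.t).getD r 0 =
      if r = a then st.t else st.stamp.getD r 0 := fun r => PySem.Dict.getD_insert _ _ _ _ _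
  refine ⟨?_, ?_, ?_, ?_, ?_, ?_, ?_, ?_, ?_, ?_, ?_⟩
  · rw [h.hmap, List.map_append]
    congr 1
    · apply List.map_congr_left
      intro r hr
      rw [hmem', if_neg (hneA r hr)]
    · simp only [List.map_cons, List.map_nil]
      rw [hmem' a, if_pos rfl, hnew]
  · intro r
    simp only [PySem.Dict.mem_keys_insert, List.mem_append, List.mem_singleton]
    rw [h.hkeys r]
    tauto
  · rw [List.map_append, List.pairwise_append]
    refine ⟨?_, by simp, ?_⟩
    · have heq : L.map (fun r => (st.stamp.insert a st.t).getD r 0) =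
          L.map (fun r => st.stamp.getD r 0) := by
        apply List.map_congr_left
        intro r hr
        rw [hstamp', if_neg (hneA r hr)]
      rw [heq]
      exact h.hstamps
    · intro u hu v hv
      simp only [List.map_cons, List.map_nil, List.mem_singleton] at hv
      simp only [List.mem_map] at hu
      obtain ⟨r, hr, rfl⟩ := hu
      rw [hstamp', if_neg (hneA r hr)]
      rw [hv, hstamp', if_pos rfl]
      exact h.hlt r hr
  · intro r hr
    show (st.stamp.insert a st.t).getD r 0 < st.t + 1
    rcases List.mem_append.mp hr with hm | hm
    · rw [hstamp', if_neg (hneA r hm)]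
      have := h.hlt r hm
      omega
    · rw [List.mem_singleton] at hm
      rw [hstamp', if_pos hm]
      omega
  · exact PySem.Dict.nodup_keys_insert _ _ _ (PySem.Dict.nodup_keys_insert _ _ _ h.hpnd)
  · exact PySem.Dict.nodup_keys_insert _ _ _ h.hmnd
  · intro z
    simp only [PySem.Dict.mem_keys_insert]
    constructor
    · intro h3
      rcases h3 with he | he | hz
      · exact ⟨a, by simp, by rw [hmem' a, if_pos rfl]; simp [he]⟩
      · exact ⟨a, by simp, by rw [hmem' a, if_pos rfl]; simp [he]⟩
      · obtain ⟨r, hr, hm⟩ := (h.hcover z).mp hz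
        refine ⟨r, List.mem_append.mpr (Or.inl hr), ?_⟩
        rw [hmem', if_neg (hneA r hr)]
        exact hm
    · rintro ⟨r, hr, hm⟩
      rcases List.mem_append.mp hr with hrL | hrA
      · rw [hmem', if_neg (hneA r hrL)] at hm
        exact Or.inr (Or.inr ((h.hcover z).mpr ⟨r, hrL, hm⟩))
      · rw [List.mem_singleton] at hrA
        rw [hmem', if_pos hrA] at hm
        rcases List.mem_cons.mp hm with he | hm
        · exact Or.inr (Or.inl he)
        · rw [List.mem_singleton] at hm
          exact Or.inl hm
  · intro r hr
    rcases List.mem_append.mp hr with hm | hm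
    · rw [hmem', if_neg (hneA r hm)]
      exact h.hsetnd r hm
    · rw [List.mem_singleton] at hm
      rw [hmem', if_pos hm]
      simp [hab]
  · intro r hr r' hr' hne z hz hz'
    rw [hmem'] at hz hz'
    rcases List.mem_append.mp hr with hm | hm
    · rw [if_neg (hneA r hm)] at hz
      rcases List.mem_append.mp hr' with hm' | hm'
      · rw [if_neg (hneA r' hm')] at hz'
        exact h.hdisj r hm r' hm' hne z hz hz'
      · rw [List.mem_singleton] at hm'
        rw [if_pos hm'] at hz'
        rcases List.mem_cons.mp hz' with he | hz'
        · exact hasets r hm (he ▸ hz)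
        · rw [List.mem_singleton] at hz'
          exact hbsets r hm (hz' ▸ hz)
    · rw [List.mem_singleton] at hm
      rw [if_pos hm] at hz
      rcases List.mem_append.mp hr' with hm' | hm'
      · rw [if_neg (hneA r' hm')] at hz'
        rcases List.mem_cons.mp hz with he | hz
        · exact hasets r' hm' (he ▸ hz')
        · rw [List.mem_singleton] at hz
          exact hbsets r' hm' (hz ▸ hz')
      · rw [List.mem_singleton] at hm'
        exact hne (hm.trans hm'.symm)
  · intro r hr z hz
    rw [hmem'] at hz ⊢
    rcases List.mem_append.mp hr with hm | hm
    · rw [if_neg (hneA r hm)] at hz ⊢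
      obtain ⟨k, hch, hk⟩ := h.hchain r hm z hz
      refine ⟨k, ?_, hk⟩
      exact pvChain_insert_not_mem (pvChain_insert_not_mem hch (hasets r hm)) (hbsets r hm)
    · rw [List.mem_singleton] at hm
      rw [if_pos hm] at hz ⊢
      rw [hm]
      have hga : ((st.parent.insert a a).insert b a).get? a = some a := by
        rw [PySem.Dict.get?_insert_of_ne _ _ hab, PySem.Dict.get?_insert_self]
      rcases List.mem_cons.mp hz with he | hz
      · refine ⟨0, ?_, by simp⟩
        rw [he]
        exact pvChain.root a (by simp) hga
      · rw [List.mem_singleton] at hz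
        refine ⟨1, ?_, by simp⟩
        refine pvChain.step z a a 0 ?_ ?_ (pvChain.root a (by simp) hga)
        · rw [hz]
          simp
        · rw [hz]
          exact PySem.Dict.get?_insert_self _ _ _
  · intro r hr
    rw [hmem']
    rcases List.mem_append.mp hr with hm | hm
    · rw [if_neg (hneA r hm)]
      exact h.hself r hm
    · rw [List.mem_singleton] at hm
      rw [if_pos hm, hm]
      simp


-- the member sets after B's merge step, away from the erased root rb
lemma pvMem_merge {L : List Int} {circuits : List (PySem.Set Int)} {st : PvDsu}
    (h : pvInvL L circuits st) {ra rb : Int}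
    (hraL : ra ∈ L) (hrbL : rb ∈ L) (hne : ra ≠ rb) :
    ∀ r, r ≠ rb → pvMem (PvDsu.mk (st.parent.insert rb ra) st.stamp
      ((st.members.modify ra [] (fun s => PySem.Set.union s (st.members.getD rb []))).erase rb)
      st.t) r = if r = ra then pvMem st ra ++ pvMem st rb else pvMem st r := by
  have hdisjab : ∀ x ∈ pvMem st rb, x ∉ pvMem st ra :=
    fun x hx => h.hdisj rb hrbL ra hraL (fun he => hne he.symm) x hx
  have hub : PySem.Set.union (pvMem st ra) (pvMem st rb) = pvMem st ra ++ pvMem st rb :=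
    pvSet_union_append _ _ hdisjab (h.hsetnd rb hrbL)
  intro r hrne
  simp only [pvMem]
  rw [pvDict_getD_erase_of_ne _ _ _ _ hrne, PySem.Dict.getD_modify,
    show st.members.getD rb [] = pvMem st rb from rfl]
  by_cases hrr : r = ra
  · rw [if_pos hrr, if_pos hrr]
    rw [show st.members.getD ra [] = pvMem st ra from rfl, hub]
  · rw [if_neg hrr, if_neg hrr]

-- B merges rb's circuit into ra's by one pointer write; the invariant for the merged state
lemma pvInv_mergeB {L : List Int} {circuits : List (PySem.Set Int)} {st : PvDsu}
    (h : pvInvL L circuits st) {ra rb : Int}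
    (hraL : ra ∈ L) (hrbL : rb ∈ L) (hne : ra ≠ rb) :
    pvInvL (L.erase rb)
      ((L.erase rb).map (pvMem (PvDsu.mk (st.parent.insert rb ra) st.stamp
        ((st.members.modify ra [] (fun s => PySem.Set.union s (st.members.getD rb []))).erase rb)
        st.t)))
      (PvDsu.mk (st.parent.insert rb ra) st.stamp
        ((st.members.modify ra [] (fun s => PySem.Set.union s (st.members.getD rb []))).erase rb)
        st.t) := by
  have hLnd : L.Nodup := pvInvL_nodupL h
  have hdisjab : ∀ x ∈ pvMem st rb, x ∉ pvMem st ra :=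
    fun x hx => h.hdisj rb hrbL ra hraL (fun he => hne he.symm) x hx
  have hub : PySem.Set.union (pvMem st ra) (pvMem st rb) = pvMem st ra ++ pvMem st rb :=
    pvSet_union_append _ _ hdisjab (h.hsetnd rb hrbL)
  have hrbs : rb ∈ pvMem st rb := h.hself rb hrbL
  have hras : ra ∈ pvMem st ra := h.hself ra hraL
  have hrbnotra : rb ∉ pvMem st ra := fun hm => hne (pvInvL_unique h hraL hrbL hm hrbs)
  have hrbnot : ∀ r ∈ L, r ≠ rb → rb ∉ pvMem st r :=
    fun r hr hrne hm => hrne (pvInvL_unique h hr hrbL hm hrbs)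
  have hmem' := pvMem_merge h hraL hrbL hne
  have hLer : ∀ r, r ∈ L.erase rb ↔ r ≠ rb ∧ r ∈ L := fun r => hLnd.mem_erase_iff
  have hraer : ra ∈ L.erase rb := (hLer ra).mpr ⟨hne, hraL⟩
  have hkeys' : ∀ r, r ∈ ((st.members.modify ra []
      (fun s => PySem.Set.union s (st.members.getD rb []))).erase rb).keys ↔
      r ≠ rb ∧ r ∈ st.members.keys := by
    intro r
    rw [pvDict_mem_keys_erase]
    rw [PySem.Dict.keys_modify, PySem.Dict.keys_insert_of_contains _ _
      ((PySem.Dict.contains_iff_mem_keys _ _).mpr ((h.hkeys ra).mp hraL))]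
  refine ⟨rfl, ?_, ?_, ?_, ?_, ?_, ?_, ?_, ?_, ?_, ?_⟩
  · intro r
    rw [hLer r, hkeys' r, h.hkeys r]
  · have hsub : (L.erase rb).Sublist L := List.erase_sublist
    exact h.hstamps.sublist (hsub.map _)
  · intro r hr
    exact h.hlt r ((hLer r).mp hr).2
  · exact PySem.Dict.nodup_keys_insert _ _ _ h.hpnd
  · apply pvDict_nodup_keys_erase
    rw [PySem.Dict.keys_modify]
    have : (st.members.insert ra ((fun s => PySem.Set.union s (st.members.getD rb []))
        (st.members.getD ra []))).keys.Nodup := PySem.Dict.nodup_keys_insert _ _ _ h.hmnd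
    exact this
  · intro z
    have hkeyseq : ∀ w, w ∈ (st.parent.insert rb ra).keys ↔ w ∈ st.parent.keys := by
      intro w
      rw [PySem.Dict.mem_keys_insert]
      constructor
      · rintro (he | hw)
        · exact (h.hcover w).mpr ⟨rb, hrbL, by rw [he]; exact hrbs⟩
        · exact hw
      · exact Or.inr
    rw [hkeyseq z, h.hcover z]
    constructor
    · rintro ⟨r, hr, hm⟩
      by_cases hrr : r = rb
      · refine ⟨ra, hraer, ?_⟩
        rw [hmem' ra hne, if_pos rfl]
        exact List.mem_append.mpr (Or.inr (hrr ▸ hm))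
      · refine ⟨r, (hLer r).mpr ⟨hrr, hr⟩, ?_⟩
        rw [hmem' r hrr]
        by_cases hrra : r = ra
        · rw [if_pos hrra]
          exact List.mem_append.mpr (Or.inl (hrra ▸ hm))
        · rw [if_neg hrra]
          exact hm
    · rintro ⟨r, hr, hm⟩
      obtain ⟨hrne, hrL⟩ := (hLer r).mp hr
      rw [hmem' r hrne] at hm
      by_cases hrra : r = ra
      · rw [if_pos hrra] at hm
        rcases List.mem_append.mp hm with hm | hm
        · exact ⟨ra, hraL, hm⟩
        · exact ⟨rb, hrbL, hm⟩
      · rw [if_neg hrra] at hm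
        exact ⟨r, hrL, hm⟩
  · intro r hr
    obtain ⟨hrne, hrL⟩ := (hLer r).mp hr
    rw [hmem' r hrne]
    by_cases hrra : r = ra
    · rw [if_pos hrra, ← hub]
      exact PySem.Set.nodup_union _ _ (hrra ▸ h.hsetnd r hrL)
    · rw [if_neg hrra]
      exact h.hsetnd r hrL
  · intro r hr r' hr' hne2 z hz hz'
    obtain ⟨hrne, hrL⟩ := (hLer r).mp hr
    obtain ⟨hr'ne, hr'L⟩ := (hLer r').mp hr'
    rw [hmem' r hrne] at hz
    rw [hmem' r' hr'ne] at hz'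
    by_cases hrra : r = ra
    · rw [if_pos hrra] at hz
      have hr'nra : ¬ r' = ra := fun he => hne2 (hrra.trans he.symm)
      rw [if_neg hr'nra] at hz'
      rcases List.mem_append.mp hz with hm | hm
      · exact h.hdisj ra hraL r' hr'L (fun he => hr'nra he.symm) z (hrra ▸ hm) hz'
      · exact h.hdisj rb hrbL r' hr'L (fun he => hr'ne he.symm) z hm hz'
    · rw [if_neg hrra] at hz
      by_cases hr'ra : r' = ra
      · rw [if_pos hr'ra] at hz'
        rcases List.mem_append.mp hz' with hm | hm
        · exact absurd (pvInvL_unique h hrL hraL hz hm) hrra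
        · exact h.hdisj r hrL rb hrbL hrne z hz hm
      · rw [if_neg hr'ra] at hz'
        exact h.hdisj r hrL r' hr'L hne2 z hz hz'
  · intro r hr z hz
    obtain ⟨hrne, hrL⟩ := (hLer r).mp hr
    rw [hmem' r hrne] at hz ⊢
    by_cases hrra : r = ra
    · rw [if_pos hrra] at hz ⊢
      rw [hrra]
      rcases List.mem_append.mp hz with hm | hm
      · obtain ⟨k, hch, hk⟩ := h.hchain ra hraL z hm
        refine ⟨k, ?_, ?_⟩
        · exact pvChain_sub (pvChain_insert_not_mem hch hrbnotra)
            (fun w hw => List.mem_append.mpr (Or.inl hw))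
        · have : 1 ≤ (pvMem st rb).length := List.length_pos_iff.mpr
            (fun he => by rw [he] at hrbs; cases hrbs)
          rw [List.length_append]
          omega
      · obtain ⟨k, hch, hk⟩ := h.hchain rb hrbL z hm
        obtain ⟨k', hk', hch'⟩ := pvChain_relink hch (pvInvL_root h hraL)
          (List.mem_append.mpr (Or.inl hras))
          (fun w hw => List.mem_append.mpr (Or.inr hw)) hne
        refine ⟨k', hch', ?_⟩
        have : 1 ≤ (pvMem st ra).length := List.length_pos_iff.mpr
          (fun he => by rw [he] at hras; cases hras)
        rw [List.length_append]
        omega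
    · rw [if_neg hrra] at hz ⊢
      obtain ⟨k, hch, hk⟩ := h.hchain r hrL z hz
      exact ⟨k, pvChain_insert_not_mem hch (hrbnot r hrL hrne), hk⟩
  · intro r hr
    obtain ⟨hrne, hrL⟩ := (hLer r).mp hr
    rw [hmem' r hrne]
    by_cases hrra : r = ra
    · rw [if_pos hrra]
      exact List.mem_append.mpr (Or.inl (hrra ▸ h.hself r hrL))
    · rw [if_neg hrra]
      exact h.hself r hrL


-- one selected pair: A's scan-based step and B's union-find step stay in simulation
lemma pvStep_inv (circuits : List (PySem.Set Int)) (st : PvDsu) (conn : Int × Int × Int)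
    (hab : conn.2.1 ≠ conn.2.2) (h : pvInv circuits st) :
    pvInv (pvStepA circuits conn) (pvStepB st conn) := by
  obtain ⟨L, h⟩ := h
  obtain ⟨dd, a, b⟩ := conn
  simp only at hab
  have hin1 := pv_any_eq h a
  have hin2 := pv_any_eq h b
  cases hca : st.parent.contains a with
  | false =>
    cases hcb : st.parent.contains b with
    | false =>
      have hA : pvStepA circuits (dd, a, b) =
          circuits ++ [PySem.Set.add (PySem.Set.add PySem.Set.empty a) b] := by
        simp only [pvStepA, hin1, hin2, hca, hcb, Bool.not_false, Bool.not_true, Bool.and_self, Bool.and_false, Bool.false_and, Bool.and_true, Bool.true_and, Bool.false_eq_true, Bool.true_eq_false, if_true, if_false]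
      have hB : pvStepB st (dd, a, b) = PvDsu.mk ((st.parent.insert a a).insert b a)
          (st.stamp.insert a st.t)
          (st.members.insert a (PySem.Set.add (PySem.Set.add PySem.Set.empty a) b))
          (st.t + 1) := by
        simp [pvStepB, hca, hcb]
      rw [hA, hB]
      exact ⟨L ++ [a], pvInv_newpair h hab hca hcb⟩
    | true =>
      have hA : pvStepA circuits (dd, a, b) = pvAddToFirst circuits b a := by
        simp only [pvStepA, hin1, hin2, hca, hcb, Bool.not_false, Bool.not_true, Bool.and_self, Bool.and_false, Bool.false_and, Bool.and_true, Bool.true_and, Bool.false_eq_true, Bool.true_eq_false, if_true, if_false]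
      have hB : pvStepB st (dd, a, b) = PvDsu.mk
          (st.parent.insert a (pvFind st.parent st.parent.size b)) st.stamp
          (st.members.modify (pvFind st.parent st.parent.size b) []
            (fun s => PySem.Set.add s a)) st.t := by
        simp [pvStepB, hca, hcb]
      rw [hA, hB]
      exact ⟨L, pvInv_addfresh h hcb hca⟩
  | true =>
    cases hcb : st.parent.contains b with
    | false =>
      have hA : pvStepA circuits (dd, a, b) = pvAddToFirst circuits a b := by
        simp only [pvStepA, hin1, hin2, hca, hcb, Bool.not_false, Bool.not_true, Bool.and_self, Bool.and_false, Bool.false_and, Bool.and_true, Bool.true_and, Bool.false_eq_true, Bool.true_eq_false, if_true, if_false]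
      have hB : pvStepB st (dd, a, b) = PvDsu.mk
          (st.parent.insert b (pvFind st.parent st.parent.size a)) st.stamp
          (st.members.modify (pvFind st.parent st.parent.size a) []
            (fun s => PySem.Set.add s b)) st.t := by
        simp [pvStepB, hca, hcb]
      rw [hA, hB]
      exact ⟨L, pvInv_addfresh h hca hcb⟩
    | true =>
      obtain ⟨ra, hraL, ham⟩ := (h.hcover a).mp ((PySem.Dict.contains_iff_mem_keys _ _).mp hca)
      obtain ⟨rb, hrbL, hbm⟩ := (h.hcover b).mp ((PySem.Dict.contains_iff_mem_keys _ _).mp hcb)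
      have hfa : pvFind st.parent st.parent.size a = ra := pvInvL_find h hraL ham
      have hfb : pvFind st.parent st.parent.size b = rb := pvInvL_find h hrbL hbm
      have hLnd : L.Nodup := pvInvL_nodupL h
      have huniqa : ∀ r ∈ L, a ∈ pvMem st r ↔ r = ra :=
        fun r hr => ⟨fun hm => pvInvL_unique h hr hraL hm ham, fun he => he ▸ ham⟩
      have huniqb : ∀ r ∈ L, b ∈ pvMem st r ↔ r = rb :=
        fun r hr => ⟨fun hm => pvInvL_unique h hr hrbL hm hbm, fun he => he ▸ hbm⟩
      have hA : pvStepA circuits (dd, a, b) =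
          (match pvFindBoth circuits a b none none 0 with
          | (some i1, some i2) =>
            if i1 = i2 then circuits
            else (circuits.set i1 (PySem.Set.union (circuits.getD i1 [])
              (circuits.getD i2 []))).eraseIdx i2
          | _ => circuits) := by
        simp only [pvStepA, hin1, hin2, hca, hcb, Bool.not_false, Bool.not_true, Bool.and_self, Bool.and_false, Bool.false_and, Bool.and_true, Bool.true_and, Bool.false_eq_true, Bool.true_eq_false, if_true, if_false]
      have hfact : ∀ (l : List Int), (∀ c ∈ l, c ≠ ra) → (∀ c ∈ l, c ≠ rb) →
          (∀ c ∈ l, c ∈ L) → ∀ e ∈ l.map (pvMem st), a ∉ e ∧ b ∉ e := by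
        intro l hna hnb hin e he
        simp only [List.mem_map] at he
        obtain ⟨c, hc, rfl⟩ := he
        exact ⟨fun hm => hna c hc ((huniqa c (hin c hc)).mp hm),
               fun hm => hnb c hc ((huniqb c (hin c hc)).mp hm)⟩
      obtain ⟨o1, o2, horder⟩ := List.append_of_mem hraL
      have hnd := hLnd
      rw [horder, List.nodup_append, List.nodup_cons] at hnd
      obtain ⟨hnd1, ⟨hra_o2, hnd2⟩, hdisjo⟩ := hnd
      have hra_o1 : ra ∉ o1 := fun hm => hdisjo ra hm ra List.mem_cons_self rfl
      by_cases hrr : ra = rb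
      · -- both endpoints already share a circuit: both sides keep their state
        have hB : pvStepB st (dd, a, b) = st := by
          simp [pvStepB, hca, hcb, hfa, hfb, hrr]
        have hbm' : b ∈ pvMem st ra := hrr ▸ hbm
        have hfbo : pvFindBoth circuits a b none none 0 = (some o1.length, some o1.length) := by
          rw [h.hmap, horder, List.map_append, List.map_cons]
          have := pvFindBoth_split1 (o1.map (pvMem st)) (o2.map (pvMem st)) (pvMem st ra) a b
            (hfact o1 (fun c hc he => hra_o1 (he ▸ hc))
              (fun c hc he => hra_o1 ((he.trans hrr.symm) ▸ hc))
              (fun c hc => by rw [horder]; simp [hc])) ham hbm'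
          simpa using this
        rw [hA, hfbo, hB]
        simp only [if_pos rfl, if_true]
        exact ⟨L, h⟩
      · -- two distinct circuits are merged
        have hrb_ne : ¬ rb = ra := fun he => hrr he.symm
        have hB : pvStepB st (dd, a, b) = PvDsu.mk (st.parent.insert rb ra) st.stamp
            ((st.members.modify ra []
              (fun s => PySem.Set.union s (st.members.getD rb []))).erase rb) st.t := by
          simp [pvStepB, hca, hcb, hfa, hfb, ne_eq, hrb_ne]
        have hmm := pvMem_merge h hraL hrbL hrr
        have hseg : ∀ (l : List Int), (∀ c ∈ l, c ≠ ra) → (∀ c ∈ l, c ≠ rb) →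
            l.map (pvMem (PvDsu.mk (st.parent.insert rb ra) st.stamp
              ((st.members.modify ra []
                (fun s => PySem.Set.union s (st.members.getD rb []))).erase rb) st.t)) =
            l.map (pvMem st) := by
          intro l h1 h2
          apply List.map_congr_left
          intro c hc
          rw [hmm c (h2 c hc), if_neg (h1 c hc)]
        have hat : pvMem (PvDsu.mk (st.parent.insert rb ra) st.stamp
            ((st.members.modify ra []
              (fun s => PySem.Set.union s (st.members.getD rb []))).erase rb) st.t) ra =
            pvMem st ra ++ pvMem st rb := by
          rw [hmm ra hrr, if_pos rfl]
        have hb_not_ra : b ∉ pvMem st ra := fun hm => hrr ((huniqb ra hraL).mp hm)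
        have ha_not_rb : a ∉ pvMem st rb := fun hm => hrb_ne ((huniqa rb hrbL).mp hm)
        have hub : PySem.Set.union (pvMem st ra) (pvMem st rb) = pvMem st ra ++ pvMem st rb :=
          pvSet_union_append _ _ (fun x hx => h.hdisj rb hrbL ra hraL hrb_ne x hx)
            (h.hsetnd rb hrbL)
        have hrb_or : rb ∈ o1 ∨ rb ∈ o2 := by
          have hm := hrbL
          rw [horder] at hm
          rcases List.mem_append.mp hm with hm | hm
          · exact Or.inl hm
          · rcases List.mem_cons.mp hm with hm | hm
            · exact absurd hm hrb_ne
            · exact Or.inr hm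
        rw [hA, hB]
        refine ⟨L.erase rb, ?_⟩
        have hgoal : (match pvFindBoth circuits a b none none 0 with
            | (some i1, some i2) =>
              if i1 = i2 then circuits
              else (circuits.set i1 (PySem.Set.union (circuits.getD i1 [])
                (circuits.getD i2 []))).eraseIdx i2
            | _ => circuits) =
            (L.erase rb).map (pvMem (PvDsu.mk (st.parent.insert rb ra) st.stamp
              ((st.members.modify ra []
                (fun s => PySem.Set.union s (st.members.getD rb []))).erase rb) st.t)) := by
          rcases hrb_or with hrb1 | hrb2
          · -- rb's circuit is listed before ra's
            obtain ⟨o11, o12, ho1⟩ := List.append_of_mem hrb1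
            subst ho1
            have hnd1' := hnd1
            rw [List.nodup_append, List.nodup_cons] at hnd1'
            obtain ⟨hnd11, ⟨hrb_o12, hnd12⟩, hdisj1⟩ := hnd1'
            have hrb_o11 : rb ∉ o11 := fun hm => hdisj1 rb hm rb List.mem_cons_self rfl
            have hra_o11 : ra ∉ o11 := fun hm => hra_o1 (by simp [hm])
            have hra_o12 : ra ∉ o12 := fun hm => hra_o1 (by simp [hm])
            have hcirc : circuits = (o11.map (pvMem st)) ++ (pvMem st rb) ::
                ((o12.map (pvMem st)) ++ (pvMem st ra) :: (o2.map (pvMem st))) := by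
              rw [h.hmap, horder]
              simp
            have hfbo : pvFindBoth circuits a b none none 0 =
                (some (o11.length + 1 + o12.length), some o11.length) := by
              rw [hcirc]
              have := pvFindBoth_split2' (o11.map (pvMem st)) (o12.map (pvMem st))
                (o2.map (pvMem st)) (pvMem st rb) (pvMem st ra) a b
                (hfact o11 (fun c hc (he : c = ra) => hra_o11 (he ▸ hc))
                  (fun c hc (he : c = rb) => hrb_o11 (he ▸ hc))
                  (fun c hc => by rw [horder]; simp [hc]))
                (hfact o12 (fun c hc (he : c = ra) => hra_o12 (he ▸ hc))
                  (fun c hc (he : c = rb) => hrb_o12 (he ▸ hc))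
                  (fun c hc => by rw [horder]; simp [hc]))
                hbm ha_not_rb hb_not_ra ham
              simpa using this
            have hAm : (match pvFindBoth circuits a b none none 0 with
                | (some i1, some i2) =>
                  if i1 = i2 then circuits
                  else (circuits.set i1 (PySem.Set.union (circuits.getD i1 [])
                    (circuits.getD i2 []))).eraseIdx i2
                | _ => circuits) =
                (circuits.set (o11.length + 1 + o12.length)
                  (PySem.Set.union (circuits.getD (o11.length + 1 + o12.length) [])
                    (circuits.getD o11.length []))).eraseIdx o11.length := by
              rw [hfbo]
              exact if_neg (by omega)
            rw [hAm]
            have hgd2 : circuits.getD o11.length [] = pvMem st rb := by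
              rw [hcirc, ← (show (o11.map (pvMem st)).length = o11.length by simp), pv_getD_mid]
            have hlen : ((o11.map (pvMem st)) ++ (pvMem st rb) :: (o12.map (pvMem st))).length =
                o11.length + 1 + o12.length := by
              rw [List.length_append, List.length_cons, List.length_map, List.length_map]
              omega
            have hassoc : circuits = ((o11.map (pvMem st)) ++ (pvMem st rb) ::
                (o12.map (pvMem st))) ++ (pvMem st ra) :: (o2.map (pvMem st)) := by
              rw [hcirc]
              simp
            have hgd1 : circuits.getD (o11.length + 1 + o12.length) [] = pvMem st ra := by
              rw [hassoc, ← hlen, pv_getD_mid]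
            rw [hgd1, hgd2]
            have hset : circuits.set (o11.length + 1 + o12.length)
                (PySem.Set.union (pvMem st ra) (pvMem st rb)) =
                (o11.map (pvMem st)) ++ (pvMem st rb) :: ((o12.map (pvMem st)) ++
                  (PySem.Set.union (pvMem st ra) (pvMem st rb)) :: (o2.map (pvMem st))) := by
              rw [hassoc, ← hlen, pv_set_mid]
              simp
            rw [hset, ← (show (o11.map (pvMem st)).length = o11.length by simp), pv_eraseIdx_mid]
            have herase : L.erase rb = o11 ++ (o12 ++ ra :: o2) := by
              rw [horder, show (o11 ++ rb :: o12) ++ ra :: o2 = o11 ++ rb :: (o12 ++ ra :: o2)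
                by simp, pv_erase_mid _ _ _ hrb_o11]
            rw [herase, List.map_append, List.map_append, List.map_cons]
            rw [hseg o11 (fun c hc (he : c = ra) => hra_o11 (he ▸ hc))
              (fun c hc (he : c = rb) => hrb_o11 (he ▸ hc))]
            rw [hseg o12 (fun c hc (he : c = ra) => hra_o12 (he ▸ hc))
              (fun c hc (he : c = rb) => hrb_o12 (he ▸ hc))]
            have hrb_o2 : rb ∉ o2 := fun hm => hdisjo rb (by simp) rb (by simp [hm]) rfl
            rw [hseg o2 (fun c hc (he : c = ra) => hra_o2 (he ▸ hc))
              (fun c hc (he : c = rb) => hrb_o2 (he ▸ hc))]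
            rw [hat, hub]
          · -- ra's circuit is listed before rb's
            obtain ⟨o21, o22, ho2⟩ := List.append_of_mem hrb2
            subst ho2
            have hnd2' := hnd2
            rw [List.nodup_append, List.nodup_cons] at hnd2'
            obtain ⟨hnd21, ⟨hrb_o22, hnd22⟩, hdisj2⟩ := hnd2'
            have hrb_o21 : rb ∉ o21 := fun hm => hdisj2 rb hm rb List.mem_cons_self rfl
            have hrb_o1 : rb ∉ o1 := fun hm => hdisjo rb hm rb (by simp [hrb2]) rfl
            have hra_o21 : ra ∉ o21 := fun hm => hra_o2 (by simp [hm])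
            have hra_o22 : ra ∉ o22 := fun hm => hra_o2 (by simp [hm])
            have hcirc : circuits = (o1.map (pvMem st)) ++ (pvMem st ra) ::
                ((o21.map (pvMem st)) ++ (pvMem st rb) :: (o22.map (pvMem st))) := by
              rw [h.hmap, horder]
              simp
            have hfbo : pvFindBoth circuits a b none none 0 =
                (some o1.length, some (o1.length + 1 + o21.length)) := by
              rw [hcirc]
              have := pvFindBoth_split2 (o1.map (pvMem st)) (o21.map (pvMem st))
                (o22.map (pvMem st)) (pvMem st ra) (pvMem st rb) a b
                (hfact o1 (fun c hc (he : c = ra) => hra_o1 (he ▸ hc))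
                  (fun c hc (he : c = rb) => hrb_o1 (he ▸ hc))
                  (fun c hc => by rw [horder]; simp [hc]))
                (hfact o21 (fun c hc (he : c = ra) => hra_o21 (he ▸ hc))
                  (fun c hc (he : c = rb) => hrb_o21 (he ▸ hc))
                  (fun c hc => by rw [horder]; simp [hc]))
                ham hb_not_ra ha_not_rb hbm
              simpa using this
            have hAm : (match pvFindBoth circuits a b none none 0 with
                | (some i1, some i2) =>
                  if i1 = i2 then circuits
                  else (circuits.set i1 (PySem.Set.union (circuits.getD i1 [])
                    (circuits.getD i2 []))).eraseIdx i2
                | _ => circuits) =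
                (circuits.set o1.length
                  (PySem.Set.union (circuits.getD o1.length [])
                    (circuits.getD (o1.length + 1 + o21.length) []))).eraseIdx
                  (o1.length + 1 + o21.length) := by
              rw [hfbo]
              exact if_neg (by omega)
            rw [hAm]
            have hgd1 : circuits.getD o1.length [] = pvMem st ra := by
              rw [hcirc, ← (show (o1.map (pvMem st)).length = o1.length by simp), pv_getD_mid]
            have hassoc : circuits = ((o1.map (pvMem st)) ++ (pvMem st ra) ::
                (o21.map (pvMem st))) ++ (pvMem st rb) :: (o22.map (pvMem st)) := by
              rw [hcirc]
              simp
            have hlen : ((o1.map (pvMem st)) ++ (pvMem st ra) :: (o21.map (pvMem st))).length =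
                o1.length + 1 + o21.length := by
              rw [List.length_append, List.length_cons, List.length_map, List.length_map]
              omega
            have hgd2 : circuits.getD (o1.length + 1 + o21.length) [] = pvMem st rb := by
              rw [hassoc, ← hlen, pv_getD_mid]
            rw [hgd1, hgd2]
            have hset : circuits.set o1.length (PySem.Set.union (pvMem st ra) (pvMem st rb)) =
                ((o1.map (pvMem st)) ++ (PySem.Set.union (pvMem st ra) (pvMem st rb)) ::
                  (o21.map (pvMem st))) ++ (pvMem st rb) :: (o22.map (pvMem st)) := by
              rw [hcirc, ← (show (o1.map (pvMem st)).length = o1.length by simp), pv_set_mid]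
              simp
            have hlen2 : ((o1.map (pvMem st)) ++
                (PySem.Set.union (pvMem st ra) (pvMem st rb)) :: (o21.map (pvMem st))).length =
                o1.length + 1 + o21.length := by
              rw [List.length_append, List.length_cons, List.length_map, List.length_map]
              omega
            rw [hset, ← hlen2, pv_eraseIdx_mid]
            have herase : L.erase rb = o1 ++ ra :: (o21 ++ o22) := by
              rw [horder, show o1 ++ ra :: (o21 ++ rb :: o22) = (o1 ++ ra :: o21) ++ rb :: o22
                by simp, pv_erase_mid _ _ _ ?_]
              · simp
              · intro hm
                rcases List.mem_append.mp hm with hm | hm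
                · exact hrb_o1 hm
                · rcases List.mem_cons.mp hm with hm | hm
                  · exact hrb_ne hm
                  · exact hrb_o21 hm
            rw [herase, List.map_append, List.map_cons, List.map_append]
            rw [hseg o1 (fun c hc (he : c = ra) => hra_o1 (he ▸ hc))
              (fun c hc (he : c = rb) => hrb_o1 (he ▸ hc))]
            rw [hseg o21 (fun c hc (he : c = ra) => hra_o21 (he ▸ hc))
              (fun c hc (he : c = rb) => hrb_o21 (he ▸ hc))]
            have hrb_o22' : rb ∉ o22 := hrb_o22
            rw [hseg o22 (fun c hc (he : c = ra) => hra_o22 (he ▸ hc))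
              (fun c hc (he : c = rb) => hrb_o22' (he ▸ hc))]
            rw [hat, hub]
            simp only [List.append_assoc, List.cons_append]
        rw [hgoal]
        exact pvInv_mergeB h hraL hrbL hrr


lemma pvFold_inv (l : List (Int × Int × Int)) (circuits : List (PySem.Set Int)) (st : PvDsu)
    (hl : ∀ c ∈ l, c.2.1 ≠ c.2.2) (h : pvInv circuits st) :
    pvInv (l.foldl pvStepA circuits) (l.foldl pvStepB st) := by
  induction l generalizing circuits st with
  | nil => exact h
  | cons x t ih =>
    exact ih _ _ (fun c hc => hl c (by simp [hc]))
      (pvStep_inv _ _ _ (hl x (by simp)) h)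

-- every selected connection pairs two distinct box indices (i < j by construction)
lemma pvChosen_pairs (boxes_cords : List (List Int)) (pairs_amount : Int) :
    ∀ c ∈ PySem.List.slice (PySem.List.sorted (pvConnectionsA boxes_cords)
      (fun x => x.1) false) none (some pairs_amount), c.2.1 ≠ c.2.2 := by
  intro c hc
  have h1 : c ∈ PySem.List.sorted (pvConnectionsA boxes_cords) (fun x => x.1) false := by
    simp only [PySem.List.slice] at hc
    exact List.mem_of_mem_drop (List.mem_of_mem_take hc)
  rw [PySem.List.mem_sorted, pvConnections_eq] at h1
  simp only [List.mem_flatMap, List.mem_map] at h1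
  obtain ⟨i, hi, j, hj, hEq⟩ := h1
  rw [← hEq]
  have hij := PySem.List.mem_pyRange_one.mp hj
  simp only [ne_eq]
  intro he
  omega

-- ===== VERDICT (by name: the statement is the Claim_ definition above) =====
theorem connect_closest_boxes_spec : Claim_equal_connect_closest_boxes := by
  intro boxes_cords pairs_amount _ _
  simp only [Spec_connect_closest_boxes, connect_closest_boxes, connect_closest_boxes_alt]
  rw [← pvConnections_eq]
  have hinit : pvInv [] (PvDsu.mk PySem.Dict.empty PySem.Dict.empty PySem.Dict.empty 0) := by
    refine ⟨[], rfl, ?_, by simp, by simp, ?_, ?_, ?_, by simp, by simp, by simp, by simp⟩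
    · intro r
      simp [PySem.Dict.keys, PySem.Dict.empty]
    · simp [PySem.Dict.keys, PySem.Dict.empty]
    · simp [PySem.Dict.keys, PySem.Dict.empty]
    · intro x
      simp [PySem.Dict.keys, PySem.Dict.empty]
  obtain ⟨L, hL⟩ := pvFold_inv _ [] _ (pvChosen_pairs boxes_cords pairs_amount) hinit
  have hsort : PySem.List.sorted
      ((PySem.List.slice (PySem.List.sorted (pvConnectionsA boxes_cords) (fun x => x.1) false)
        none (some pairs_amount)).foldl pvStepB
        (PvDsu.mk PySem.Dict.empty PySem.Dict.empty PySem.Dict.empty 0)).members.keys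
      (fun r => ((PySem.List.slice (PySem.List.sorted (pvConnectionsA boxes_cords)
        (fun x => x.1) false) none (some pairs_amount)).foldl pvStepB
        (PvDsu.mk PySem.Dict.empty PySem.Dict.empty PySem.Dict.empty 0)).stamp.getD r 0)
      false = L := by
    apply PySem.List.sorted_eq_of_perm_of_pairwise_lt
    · exact (List.perm_ext_iff_of_nodup (pvInvL_nodupL hL) hL.hmnd).mpr hL.hkeys
    · have hp := hL.hstamps
      rwa [List.pairwise_map] at hp
  rw [hsort]
  exact hL.hmap
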